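-- pv_equiv track=rewrite | github.com/kangminchan99/coding_test_python | 프로그래머스/코딩 기초 트레이닝/Lv0 - 옹알이 (1).py | solution
-- ===== SOURCE A (Python) =====
-- def solution(babbling):
--     word = [ "aya", "ye", "woo", "ma"]
--     check = ''
--     result = 0
--     for i in babbling:
--         for j in i:
--             check += j
--             if check in word:
--                 check = ''
--
--         if check == '':
--             result += 1
--         check = ''
--
--
--     return result
-- ===== SOURCE B (Python) =====
-- def solution(babbling):
--     sounds = ("aya", "ye", "woo", "ma")
--
--     def ok(w):
--         if w == "":
--             return True
--         return any(w.startswith(s) and ok(w[len(s):]) for s in sounds)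
--
--     return sum(ok(w) for w in babbling)
-- ===== Notes on version B (the rewrite author's own statement) =====
-- stated objective: simpler
-- what changed: Replaces the character-by-character buffer/reset state machine with a recursive-descent tokenizer that strips one whole sound off the front at a time (valid because no sound is a prefix of another).
import Mathlib
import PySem

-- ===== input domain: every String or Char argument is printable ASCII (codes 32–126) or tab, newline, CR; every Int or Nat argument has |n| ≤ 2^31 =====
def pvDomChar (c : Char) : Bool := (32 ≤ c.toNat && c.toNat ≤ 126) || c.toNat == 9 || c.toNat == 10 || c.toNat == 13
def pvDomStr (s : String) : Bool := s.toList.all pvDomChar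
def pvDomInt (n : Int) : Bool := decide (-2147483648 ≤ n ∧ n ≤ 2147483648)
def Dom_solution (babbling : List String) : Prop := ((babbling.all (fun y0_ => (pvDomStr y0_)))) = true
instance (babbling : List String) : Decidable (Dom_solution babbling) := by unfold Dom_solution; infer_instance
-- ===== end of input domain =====

-- B replaces A's char-by-char buffer/reset state machine with a recursive-descent
-- tokenizer stripping whole sounds off the front (objective: simpler).

-- ===== PORT A =====
-- Python strings are ported as List Char (PySem.Chars convention); `word` is A's list.
def wordA : List (List Char) := [['a','y','a'], ['y','e'], ['w','o','o'], ['m','a']]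

-- inner-loop body: check += j; if check in word: check = ''
def stepA (check : List Char) (j : Char) : List Char :=
  let c := check ++ [j]
  if c ∈ wordA then [] else c

-- outer-loop body: run the inner loop, count if check emptied, reset check
def bodyA (st : List Char × Int) (i : String) : List Char × Int :=
  let check := i.toList.foldl stepA st.1
  let result := if check = [] then st.2 + 1 else st.2
  ([], result)

def solution (babbling : List String) : Int :=
  (babbling.foldl bodyA ([], 0)).2

-- ===== PORT B =====
def soundsB : List (List Char) := [['a','y','a'], ['y','e'], ['w','o','o'], ['m','a']]

-- `ok`: w == "" or some sound is a prefix and the rest is ok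
def okB (w : List Char) : Bool :=
  if w = [] then true
  else soundsB.attach.any fun s => s.val.isPrefixOf w && okB (w.drop s.val.length)
termination_by w.length
decreasing_by
  rename_i h
  have hm := s.property
  have hw : 1 ≤ w.length := by
    cases w with
    | nil => exact absurd rfl h
    | cons a t => simp
  simp only [soundsB, List.mem_cons, List.not_mem_nil, or_false] at hm
  rcases hm with h1 | h1 | h1 | h1 <;> rw [h1] <;> simp <;> omega

-- sum(ok(w) for w in babbling)
def bodyB (acc : Int) (w : String) : Int :=
  acc + (if okB w.toList then 1 else 0)

def solution_alt (babbling : List String) : Int :=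
  babbling.foldl bodyB 0

-- ===== PRECONDITION & SPEC =====
def Spec_solution (babbling : List String) (out : Int) : Prop := out = solution_alt babbling
instance (babbling : List String) (out : Int) : Decidable (Spec_solution babbling out) := by unfold Spec_solution; infer_instance

-- ===== CLAIM (what is proved, stated in full; the proofs are below) =====
def Claim_equal_solution : Prop := ∀ (babbling : List String), Dom_solution babbling → Spec_solution babbling (solution babbling)

-- ===== LEMMAS AND PROOFS =====

-- every member of wordA has length 2 or 3
theorem mem_wordA_len {l : List Char} (h : l ∈ wordA) : l.length = 2 ∨ l.length = 3 := by
  simp only [wordA, List.mem_cons, List.not_mem_nil, or_false] at h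
  rcases h with h | h | h | h <;> subst h <;> simp

-- singletons are never words
theorem single_not_mem (c : Char) : [c] ∉ wordA := by
  intro h; rcases mem_wordA_len h with h | h <;> simp at h

-- once the buffer has length ≥ 3 it can never empty again
theorem stuck (w : List Char) : ∀ check : List Char, 3 ≤ check.length →
    (w.foldl stepA check) ≠ [] := by
  induction w with
  | nil => intro check h hc; subst hc; simp at h
  | cons j t ih =>
      intro check h
      have hne : check ++ [j] ∉ wordA := by
        intro hm; rcases mem_wordA_len hm with hl | hl <;> simp at hl <;> omega
      simp only [List.foldl_cons, stepA, if_neg hne]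
      exact ih _ (by simp; omega)

-- if the machine empties on a nonempty word, some listed word is a prefix
theorem reset_prefix (w : List Char) (hw : w ≠ []) (h : w.foldl stepA [] = []) :
    ∃ s ∈ wordA, s.isPrefixOf w := by
  match w, hw with
  | [a], _ =>
      rw [List.foldl_cons, List.foldl_nil,
        show stepA [] a = [a] from by simp [stepA, single_not_mem a]] at h
      exact absurd h (by simp)
  | a :: b :: t, _ =>
      rw [List.foldl_cons, List.foldl_cons,
        show stepA [] a = [a] from by simp [stepA, single_not_mem a]] at h
      by_cases h2 : [a, b] ∈ wordA
      · exact ⟨[a, b], h2, by simp [List.isPrefixOf]⟩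
      · rw [show stepA [a] b = [a, b] from by simp [stepA, h2]] at h
        match t with
        | [] =>
            rw [List.foldl_nil] at h
            exact absurd h (by simp)
        | c :: t' =>
            rw [List.foldl_cons] at h
            by_cases h3 : [a, b, c] ∈ wordA
            · exact ⟨[a, b, c], h3, by simp [List.isPrefixOf]⟩
            · rw [show stepA [a, b] c = [a, b, c] from by simp [stepA, h3]] at h
              exact absurd h (stuck t' _ (by simp))

-- consuming a whole listed word from the empty buffer resets the buffer
theorem consume_word {s : List Char} (hs : s ∈ wordA) (rest : List Char) :
    (s ++ rest).foldl stepA [] = rest.foldl stepA [] := by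
  rw [List.foldl_append]
  simp only [wordA, List.mem_cons, List.not_mem_nil, or_false] at hs
  rcases hs with h | h | h | h <;> subst h <;> simp [stepA, wordA]

-- the two acceptors agree
theorem machine_eq_okB (w : List Char) : (w.foldl stepA [] = []) ↔ okB w = true := by
  induction hn : w.length using Nat.strong_induction_on generalizing w with
  | _ n ih =>
    subst hn
    by_cases hw : w = []
    · subst hw; simp [okB]
    · rw [okB, if_neg hw]
      constructor
      · intro h
        obtain ⟨s, hs, hpre⟩ := reset_prefix w hw h
        obtain ⟨rest, hrest⟩ := List.isPrefixOf_iff_prefix.mp hpre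
        have hslen : 1 ≤ s.length := by rcases mem_wordA_len hs with h' | h' <;> omega
        subst hrest
        have hrec : okB rest = true :=
          (ih rest.length (by simp; omega) rest rfl).mp
            (by rw [← consume_word hs rest]; exact h)
        simp only [List.any_eq_true, List.mem_attach, true_and, Subtype.exists]
        refine ⟨s, by simpa [soundsB, wordA] using hs, ?_⟩
        simp [hpre, hrec]
      · intro h
        simp only [List.any_eq_true, List.mem_attach, true_and, Subtype.exists,
          Bool.and_eq_true] at h
        obtain ⟨s, hs, hpre, hrec⟩ := h
        have hs' : s ∈ wordA := by simpa [soundsB, wordA] using hs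
        obtain ⟨rest, hrest⟩ := List.isPrefixOf_iff_prefix.mp hpre
        have hslen : 1 ≤ s.length := by rcases mem_wordA_len hs' with h' | h' <;> omega
        subst hrest
        rw [consume_word hs' rest]
        exact (ih rest.length (by simp; omega) rest rfl).mpr
          (by simpa [List.drop_left] using hrec)

theorem fold_eq (l : List String) : ∀ r : Int,
    (l.foldl bodyA ([], r)).2 = l.foldl bodyB r := by
  induction l with
  | nil => intro r; rfl
  | cons i t ih =>
      intro r
      have h1 : bodyA ([], r) i
          = ([], if i.toList.foldl stepA [] = [] then r + 1 else r) := rfl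
      rw [List.foldl_cons, List.foldl_cons, h1, ih]
      congr 1
      show (if i.toList.foldl stepA [] = [] then r + 1 else r) = bodyB r i
      by_cases hm : i.toList.foldl stepA [] = []
      · rw [bodyB, if_pos hm, if_pos ((machine_eq_okB _).mp hm)]
      · rw [bodyB, if_neg hm, if_neg (fun hk => hm ((machine_eq_okB _).mpr hk)), add_zero]

-- ===== VERDICT (by name: the statement is the Claim_ definition above) =====
theorem solution_spec : Claim_equal_solution := by
  intro babbling _
  unfold Spec_solution solution solution_alt
  exact fold_eq babbling 0
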